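-- pv_equiv track=rewrite | github.com/GeorgeBeshay/ProblemSolving | CF_Phase_2_1/Greedy/P137B_Permutation.py | TheAmazingFunction
-- ===== SOURCE A (Python) =====
-- def TheAmazingFunction(S: list):
--     table = dict()
--     Ans = 0
--     for i in S:
--         table.update({i: 1})
--     for i in range(1, len(S)+1):
--         if table.get(i) is None:
--             Ans += 1
--     return Ans
-- ===== SOURCE B (Python) =====
-- def TheAmazingFunction(S: list):
--     n = len(S)
--     present = {x for x in S if 1 <= x <= n}
--     return n - len(present)
-- ===== Notes on version B (the rewrite author's own statement) =====
-- stated objective: simpler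
-- what changed: Replaces the dict build plus an explicit scan over range(1, n+1) counting absent keys by complement arithmetic: one set comprehension of the distinct in-range values and the subtraction n - len(present).
import Mathlib
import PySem

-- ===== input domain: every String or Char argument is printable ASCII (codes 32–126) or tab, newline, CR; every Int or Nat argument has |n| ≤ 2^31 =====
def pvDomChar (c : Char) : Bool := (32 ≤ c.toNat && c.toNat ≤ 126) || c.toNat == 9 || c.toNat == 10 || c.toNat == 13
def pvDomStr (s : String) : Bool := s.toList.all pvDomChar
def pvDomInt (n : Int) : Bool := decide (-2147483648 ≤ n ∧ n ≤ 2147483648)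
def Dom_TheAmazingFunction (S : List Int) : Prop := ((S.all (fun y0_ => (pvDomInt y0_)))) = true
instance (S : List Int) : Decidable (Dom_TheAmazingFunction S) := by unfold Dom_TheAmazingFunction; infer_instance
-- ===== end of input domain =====

-- B replaces A's dict build plus range(1, n+1) scan by complement arithmetic:
-- n minus the number of distinct in-range values (objective: simpler).

-- ===== PORT A =====
def TheAmazingFunction (S : List Int) : Int :=
  let table : PySem.Dict Int Int := S.foldl (fun d i => d.insert i 1) PySem.Dict.empty
  (PySem.List.pyRange 1 ((S.length : Int) + 1)).foldl
    (fun ans i => if table.get? i = none then ans + 1 else ans) 0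

-- ===== PORT B =====
def TheAmazingFunction_alt (S : List Int) : Int :=
  let n := S.length
  let present : PySem.Set Int := PySem.Set.ofList (S.filter (fun x => 1 ≤ x && x ≤ (n : Int)))
  (n : Int) - (PySem.Set.len present : Int)

-- ===== PRECONDITION & SPEC =====
def Spec_TheAmazingFunction (S : List Int) (out : Int) : Prop := out = TheAmazingFunction_alt S
instance (S : List Int) (out : Int) : Decidable (Spec_TheAmazingFunction S out) := by unfold Spec_TheAmazingFunction; infer_instance

-- ===== CLAIM (what is proved, stated in full; the proofs are below) =====
def Claim_equal_TheAmazingFunction : Prop := ∀ (S : List Int), Dom_TheAmazingFunction S → Spec_TheAmazingFunction S (TheAmazingFunction S)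

-- ===== LEMMAS AND PROOFS =====

-- A's dict lookup after the build loop is exactly list membership.
lemma pv_table_get_none (S : List Int) (i : Int) :
    (S.foldl (fun d j => d.insert j (1 : Int)) PySem.Dict.empty).get? i = none ↔ i ∉ S := by
  rw [PySem.Dict.get?_eq_none_iff_not_mem_keys]
  have hk : (S.foldl (fun d j => d.insert j (1 : Int)) PySem.Dict.empty).keys
      = PySem.Set.ofList S := by
    simpa [PySem.Set.update_nil_left] using
      PySem.Dict.keys_foldl_insert S (fun _ _ => (1 : Int)) PySem.Dict.empty
  rw [hk]
  simp [PySem.Set.mem_ofList]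

-- The distinct in-range values of S are a permutation of the present members of range(1, n+1).
lemma pv_present_perm (S : List Int) :
    (PySem.Set.ofList (S.filter (fun x => 1 ≤ x && x ≤ (S.length : Int)))).Perm
      ((PySem.List.pyRange 1 ((S.length : Int) + 1)).filter (fun i => decide (i ∈ S))) := by
  apply (List.perm_ext_iff_of_nodup (PySem.Set.nodup_ofList _)
    ((PySem.List.nodup_pyRange_one _ _).filter _)).mpr
  intro x
  simp only [PySem.Set.mem_ofList, List.mem_filter, PySem.List.mem_pyRange_one,
    decide_eq_true_eq, Bool.and_eq_true]
  constructor
  · rintro ⟨hx, h1, h2⟩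
    exact ⟨⟨by exact_mod_cast h1, by omega⟩, hx⟩
  · rintro ⟨⟨h1, h2⟩, hx⟩
    exact ⟨hx, by exact_mod_cast h1, by omega⟩

theorem pv_main (S : List Int) : TheAmazingFunction S = TheAmazingFunction_alt S := by
  unfold TheAmazingFunction TheAmazingFunction_alt
  simp only []
  have hfun : (fun (ans : Int) (i : Int) =>
      if (S.foldl (fun d j => d.insert j (1 : Int)) PySem.Dict.empty).get? i = none
      then ans + 1 else ans)
      = (fun (ans : Int) (i : Int) => if (decide (i ∉ S)) = true then ans + 1 else ans) := by
    funext ans i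
    by_cases h : i ∈ S <;> simp [pv_table_get_none, h]
  rw [hfun, PySem.List.foldl_count_if]
  have hperm := pv_present_perm S
  have hlen := hperm.length_eq
  rw [← List.countP_eq_length_filter] at hlen
  have hsplit := List.length_eq_countP_add_countP (l := PySem.List.pyRange 1 ((S.length : Int) + 1))
    (fun i => decide (i ∈ S))
  have hR : (PySem.List.pyRange 1 ((S.length : Int) + 1)).length = S.length := by
    rw [PySem.List.length_pyRange_one]; omega
  have hcount : List.countP (fun i => decide (i ∉ S))
      (PySem.List.pyRange 1 ((S.length : Int) + 1))
      = S.length - List.countP (fun i => decide (i ∈ S))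
        (PySem.List.pyRange 1 ((S.length : Int) + 1)) := by
    have : List.countP (fun i => decide (¬ (decide (i ∈ S)) = true))
        (PySem.List.pyRange 1 ((S.length : Int) + 1))
        = List.countP (fun i => decide (i ∉ S))
          (PySem.List.pyRange 1 ((S.length : Int) + 1)) := by
      apply List.countP_congr; intro x _; simp
    omega
  rw [hcount]
  unfold PySem.Set.len
  rw [hlen]
  have hle : List.countP (fun i => decide (i ∈ S))
      (PySem.List.pyRange 1 ((S.length : Int) + 1)) ≤ S.length := by
    have := List.countP_le_length (l := PySem.List.pyRange 1 ((S.length : Int) + 1))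
      (p := fun i => decide (i ∈ S))
    omega
  omega

-- ===== VERDICT (by name: the statement is the Claim_ definition above) =====
theorem TheAmazingFunction_spec : Claim_equal_TheAmazingFunction := by
  intro S _
  unfold Spec_TheAmazingFunction
  exact pv_main S
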